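-- pv_equiv track=rewrite | github.com/sanantoha/algos | strings/minimum_characters_for_words.py | minimumCharactersForWords
-- ===== SOURCE A (Python) =====
-- def minimumCharactersForWords(words):
--     if words is None or len(words) == 0:
--         return []
--
--     map = {}
--
--     for word in words:
--         characters = {}
--         for c in word:
--             lst = characters.get(c, [])
--             lst.append(c)
--             characters[c] = lst
--
--         for c, l in characters.items():
--             if c in map:
--                 map[c] = max(map[c], characters[c], key=lambda x: len(x))
--             else:
--                 map[c] = characters[c]
--
--
--     res = []
--     for l in map.values():
--         res.extend(l)
--
--     return res
-- ===== SOURCE B (Python) =====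
-- def minimumCharactersForWords(words):
--     if not words:
--         return []
--     # pass 1: distinct characters in first-appearance order
--     seen = set()
--     order = []
--     for word in words:
--         for c in word:
--             if c not in seen:
--                 seen.add(c)
--                 order.append(c)
--     # pass 2: per character, the max count over all words
--     res = []
--     for c in order:
--         cnt = 0
--         for word in words:
--             cnt = max(cnt, word.count(c))
--         res += [c] * cnt
--     return res
-- ===== Notes on version B (the rewrite author's own statement) =====
-- stated objective: simpler
-- what changed: Replaces A's per-word count-list dicts merged by max-by-length with a first-appearance order-collection pass followed by per-character str.count scans; no dict of repeated-character lists is ever built.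
import Mathlib
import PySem

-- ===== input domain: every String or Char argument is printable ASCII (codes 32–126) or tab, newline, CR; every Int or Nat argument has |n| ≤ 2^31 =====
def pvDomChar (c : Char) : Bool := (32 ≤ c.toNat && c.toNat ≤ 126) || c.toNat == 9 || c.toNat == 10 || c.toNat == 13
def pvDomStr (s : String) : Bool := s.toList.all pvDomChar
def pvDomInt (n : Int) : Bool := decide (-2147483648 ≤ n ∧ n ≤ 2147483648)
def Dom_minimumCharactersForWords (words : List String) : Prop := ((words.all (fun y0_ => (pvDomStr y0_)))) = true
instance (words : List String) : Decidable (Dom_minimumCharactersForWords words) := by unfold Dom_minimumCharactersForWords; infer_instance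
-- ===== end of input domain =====

-- B replaces A's per-word count-list dicts merged by max-by-length with a first-appearance
-- order-collection pass followed by per-character str.count scans (objective: simpler).

-- ===== PORT A =====
-- max(a, b, key=len): Python's max returns the FIRST maximal argument, so b only when strictly longer
def pyMaxByLen (a b : List String) : List String := if b.length > a.length then b else a

-- inner loop: characters = {}; for c in word: characters[c] = characters.get(c, []) + [c]
def pvCharsOf (word : String) : PySem.Dict Char (List String) :=
  word.toList.foldl (fun d c => d.insert c (d.getD c [] ++ [String.singleton c])) PySem.Dict.empty

-- one iteration of 'for c, l in characters.items()'; map[c] (guarded by 'c in map') and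
-- characters[c] are total lookups here, ported as getD under the contains guard
def pvMergeStep (chars : PySem.Dict Char (List String)) (m : PySem.Dict Char (List String))
    (p : Char × List String) : PySem.Dict Char (List String) :=
  if m.contains p.1 then m.insert p.1 (pyMaxByLen (m.getD p.1 []) (chars.getD p.1 []))
  else m.insert p.1 p.2

-- body of 'for word in words'
def pvWordStep (m : PySem.Dict Char (List String)) (word : String) : PySem.Dict Char (List String) :=
  let chars := pvCharsOf word
  chars.items.foldl (pvMergeStep chars) m

def minimumCharactersForWords (words : List String) : List String :=
  if words.length = 0 then []
  else
    let m := words.foldl pvWordStep PySem.Dict.empty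
    m.values.foldl (fun r l => r ++ l) []

-- ===== PORT B =====
-- pass 1: distinct characters in first-appearance order (seen-set + order list)
def pvOrderStep (st : PySem.Set Char × List Char) (c : Char) : PySem.Set Char × List Char :=
  if st.1.contains c then st else (st.1.add c, st.2 ++ [c])

def minimumCharactersForWords_alt (words : List String) : List String :=
  if words.length = 0 then []
  else
    let st := words.foldl (fun st word => word.toList.foldl pvOrderStep st)
      ((PySem.Set.empty : PySem.Set Char), ([] : List Char))
    st.2.foldl (fun res c =>
      let cnt : Nat := words.foldl (fun cnt word => max cnt (PySem.Str.count word (String.singleton c))) 0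
      res ++ List.replicate cnt (String.singleton c)) []

-- ===== PRECONDITION & SPEC =====
def Spec_minimumCharactersForWords (words : List String) (out : List String) : Prop := out = minimumCharactersForWords_alt words
instance (words : List String) (out : List String) : Decidable (Spec_minimumCharactersForWords words out) := by unfold Spec_minimumCharactersForWords; infer_instance

-- ===== CLAIM (what is proved, stated in full; the proofs are below) =====
def Claim_equal_minimumCharactersForWords : Prop := ∀ (words : List String), Dom_minimumCharactersForWords words → Spec_minimumCharactersForWords words (minimumCharactersForWords words)

-- ===== LEMMAS AND PROOFS =====

-- distinct characters of the processed words, in first-appearance order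
def pvOrd (p : List String) : List Char :=
  p.foldl (fun s w => w.toList.foldl PySem.Set.add s) PySem.Set.empty

-- running maximum of per-word counts of c
def pvCnt (p : List String) (c : Char) : Nat :=
  p.foldl (fun n w => max n (w.toList.count c)) 0

theorem pvCnt_append (p : List String) (w : String) (c : Char) :
    pvCnt (p ++ [w]) c = max (pvCnt p c) (w.toList.count c) := by
  simp [pvCnt, List.foldl_append]

-- ---- the per-word characters dict ----
theorem charsOf_getD_aux (l : List Char) (c : Char) :
    ∀ d : PySem.Dict Char (List String),
      (l.foldl (fun d c => d.insert c (d.getD c [] ++ [String.singleton c])) d).getD c [] =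
        d.getD c [] ++ List.replicate (l.count c) (String.singleton c) := by
  induction l with
  | nil => intro d; simp
  | cons a t ih =>
    intro d
    rw [List.foldl_cons, ih]
    by_cases h : c = a
    · subst h
      simp [List.replicate_succ, List.append_assoc]
    · simp [PySem.Dict.getD_insert, h, Ne.symm h]

theorem charsOf_getD (w : String) (c : Char) :
    (pvCharsOf w).getD c [] = List.replicate (w.toList.count c) (String.singleton c) := by
  simpa using charsOf_getD_aux w.toList c PySem.Dict.empty

theorem charsOf_keys (w : String) : (pvCharsOf w).keys = PySem.Set.ofList w.toList := by
  simpa using PySem.Dict.keys_foldl_insert w.toList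
    (fun d c => d.getD c [] ++ [String.singleton c]) PySem.Dict.empty

-- ---- the merge loop over characters.items() ----
theorem mergeStep_eq_insert (chars m : PySem.Dict Char (List String)) (p : Char × List String) :
    pvMergeStep chars m p =
      m.insert p.1 (if m.contains p.1 then pyMaxByLen (m.getD p.1 []) (chars.getD p.1 []) else p.2) := by
  unfold pvMergeStep; split <;> simp_all

theorem merge_get?_not_mem (chars : PySem.Dict Char (List String)) (L : List (Char × List String))
    (c : Char) (h : c ∉ L.map Prod.fst) :
    ∀ m, (L.foldl (pvMergeStep chars) m).get? c = m.get? c := by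
  induction L with
  | nil => intro m; rfl
  | cons q t ih =>
    intro m
    simp only [List.map_cons, List.mem_cons, not_or] at h
    simp only [List.foldl_cons, ih h.2, mergeStep_eq_insert,
      PySem.Dict.get?_insert_of_ne _ _ h.1]

theorem merge_get?_mem (chars : PySem.Dict Char (List String)) (L : List (Char × List String))
    (hnd : (L.map Prod.fst).Nodup) :
    ∀ p ∈ L, ∀ m, (L.foldl (pvMergeStep chars) m).get? p.1 =
      some (if m.contains p.1 then pyMaxByLen (m.getD p.1 []) (chars.getD p.1 []) else p.2) := by
  induction L with
  | nil => intro p hp; cases hp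
  | cons q t ih =>
    intro p hp m
    simp only [List.map_cons, List.nodup_cons] at hnd
    rcases List.mem_cons.mp hp with rfl | hp
    · simp only [List.foldl_cons,
        merge_get?_not_mem chars t p.1 hnd.1, mergeStep_eq_insert,
        PySem.Dict.get?_insert_self]
    · have hne : q.1 ≠ p.1 := by
        intro h; exact hnd.1 (h ▸ List.mem_map_of_mem hp)
      simp only [List.foldl_cons, ih hnd.2 p hp]
      congr 1
      have hget : (pvMergeStep chars m q).get? p.1 = m.get? p.1 := by
        rw [mergeStep_eq_insert, PySem.Dict.get?_insert_of_ne _ _ (Ne.symm hne)]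
      rw [PySem.Dict.contains_eq_isSome_get?, PySem.Dict.contains_eq_isSome_get?, hget]
      simp [PySem.Dict.getD_eq_get?_getD, hget]

-- ---- invariant for A's outer map ----
theorem pvOrd_append (p : List String) (w : String) :
    pvOrd (p ++ [w]) = w.toList.foldl PySem.Set.add (pvOrd p) := by
  simp [pvOrd, List.foldl_append]

theorem pvOrd_nodup (p : List String) : (pvOrd p).Nodup := by
  induction p using List.reverseRecOn with
  | nil => exact List.nodup_nil
  | append_singleton p w ih =>
    rw [pvOrd_append, ← PySem.Set.update_eq_foldl]
    exact PySem.Set.nodup_update _ _ ih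

theorem set_update_append_singleton (s : PySem.Set Char) (l : List Char) (x : Char) :
    PySem.Set.update s (l ++ [x]) = (PySem.Set.update s l).add x := by
  simp [PySem.Set.update_eq_foldl, List.foldl_append]

theorem set_update_ofList (l : List Char) (s : PySem.Set Char) :
    PySem.Set.update s (PySem.Set.ofList l) = PySem.Set.update s l := by
  induction l using List.reverseRecOn generalizing s with
  | nil => rfl
  | append_singleton l x ih =>
    rw [PySem.Set.ofList_append_singleton, set_update_append_singleton]
    by_cases hx : x ∈ PySem.Set.ofList l
    · rw [PySem.Set.add_of_mem hx, ih]
      have hxu : x ∈ PySem.Set.update s l :=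
        (PySem.Set.mem_update s l x).2 (Or.inr ((PySem.Set.mem_ofList l x).1 hx))
      rw [PySem.Set.add_of_mem hxu]
    · have hxl : x ∉ l := fun h => hx ((PySem.Set.mem_ofList l x).2 h)
      have hadd : PySem.Set.add (PySem.Set.ofList l) x = PySem.Set.ofList l ++ [x] := by
        unfold PySem.Set.add; simp [hxl]
      rw [hadd, set_update_append_singleton s (PySem.Set.ofList l) x, ih]

theorem amap_inv (p : List String) :
    (p.foldl pvWordStep PySem.Dict.empty).keys = pvOrd p ∧
    (∀ c, (p.foldl pvWordStep PySem.Dict.empty).get? c =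
      if 0 < pvCnt p c then some (List.replicate (pvCnt p c) (String.singleton c)) else none) := by
  induction p using List.reverseRecOn with
  | nil =>
    refine ⟨by simp [pvOrd, PySem.Set.empty], fun c => by simp [pvCnt, PySem.Dict.get?_empty]⟩
  | append_singleton p w ih =>
    obtain ⟨hk, hg⟩ := ih
    rw [List.foldl_append, List.foldl_cons, List.foldl_nil]
    have hnodupw : ((pvCharsOf w).items.map Prod.fst).Nodup := by
      have : (pvCharsOf w).items.map Prod.fst = (pvCharsOf w).keys := rfl
      rw [this, charsOf_keys]
      exact PySem.Set.nodup_ofList w.toList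
    constructor
    · -- keys
      have hfun : (pvMergeStep (pvCharsOf w)) = fun m q => m.insert q.1
          ((fun (m : PySem.Dict Char (List String)) (q : Char × List String) =>
            if m.contains q.1 then pyMaxByLen (m.getD q.1 []) ((pvCharsOf w).getD q.1 []) else q.2) m q) := by
        funext m q; exact mergeStep_eq_insert _ m q
      show ((pvCharsOf w).items.foldl (pvMergeStep (pvCharsOf w)) _).keys = _
      rw [hfun, PySem.Dict.keys_foldl_insert_key]
      have hik : (pvCharsOf w).items.map Prod.fst = (pvCharsOf w).keys := rfl
      rw [hik, charsOf_keys, hk, set_update_ofList, pvOrd_append, PySem.Set.update_eq_foldl]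
    · intro c
      have hchars : (pvCharsOf w).getD c [] = List.replicate (w.toList.count c) (String.singleton c) :=
        charsOf_getD w c
      show ((pvCharsOf w).items.foldl (pvMergeStep (pvCharsOf w)) _).get? c = _
      by_cases hw : c ∈ w.toList
      · have hkeys : c ∈ (pvCharsOf w).keys := by
          rw [charsOf_keys]; exact (PySem.Set.mem_ofList _ _).2 hw
        obtain ⟨v, hv⟩ : ∃ v, (pvCharsOf w).get? c = some v := by
          rcases h : (pvCharsOf w).get? c with _ | v
          · exact absurd hkeys ((PySem.Dict.get?_eq_none_iff_not_mem_keys _ _).1 h)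
          · exact ⟨v, rfl⟩
        have hvitem : (c, v) ∈ (pvCharsOf w).items := PySem.Dict.mem_items_of_get?_eq_some _ hv
        have hveq : v = List.replicate (w.toList.count c) (String.singleton c) := by
          rw [← hchars, PySem.Dict.getD_of_get?_eq_some _ [] hv]
        have hmain := merge_get?_mem (pvCharsOf w) (pvCharsOf w).items hnodupw (c, v) hvitem
          (p.foldl pvWordStep PySem.Dict.empty)
        rw [hmain, pvCnt_append]
        by_cases hc : 0 < pvCnt p c
        · have hcontains : (p.foldl pvWordStep PySem.Dict.empty).contains c = true := by
            rw [PySem.Dict.contains_eq_isSome_get?, hg c]; simp [hc]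
          have hgetD : (p.foldl pvWordStep PySem.Dict.empty).getD c [] =
              List.replicate (pvCnt p c) (String.singleton c) :=
            PySem.Dict.getD_of_get?_eq_some _ [] (by rw [hg c]; simp [hc])
          have hmax : pyMaxByLen (List.replicate (pvCnt p c) (String.singleton c))
              (List.replicate (w.toList.count c) (String.singleton c)) =
              List.replicate (max (pvCnt p c) (w.toList.count c)) (String.singleton c) := by
            unfold pyMaxByLen; simp only [List.length_replicate]
            split <;> congr 1 <;> omega
          have hpos : 0 < max (pvCnt p c) (w.toList.count c) :=
            lt_of_lt_of_le hc (le_max_left _ _)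
          simp [hcontains, hgetD, hchars, hmax, hpos]
        · have hc0 : pvCnt p c = 0 := Nat.eq_zero_of_not_pos hc
          have hcontains : (p.foldl pvWordStep PySem.Dict.empty).contains c = false := by
            rw [PySem.Dict.contains_eq_isSome_get?, hg c]; simp [hc0]
          have hwpos : 0 < w.toList.count c := List.count_pos_iff.2 hw
          simp [hcontains, hveq, hc0, hwpos]
      · have hnotin : c ∉ (pvCharsOf w).items.map Prod.fst := by
          have hik : (pvCharsOf w).items.map Prod.fst = (pvCharsOf w).keys := rfl
          rw [hik, charsOf_keys]
          simpa using fun h => hw ((PySem.Set.mem_ofList _ _).1 h)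
        rw [merge_get?_not_mem _ _ _ hnotin, hg c, pvCnt_append]
        have hz : w.toList.count c = 0 := List.count_eq_zero.2 hw
        simp [hz]

-- ---- B-side ----
theorem bOrder_pair (l : List Char) :
    ∀ s : PySem.Set Char, l.foldl pvOrderStep (s, s) = (l.foldl PySem.Set.add s, l.foldl PySem.Set.add s) := by
  induction l with
  | nil => intro s; rfl
  | cons a t ih =>
    intro s
    have : pvOrderStep (s, s) a = (PySem.Set.add s a, PySem.Set.add s a) := by
      unfold pvOrderStep PySem.Set.add; split <;> simp_all
    simp only [List.foldl_cons, this, ih]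

theorem bOrder (words : List String) :
    words.foldl (fun st word => word.toList.foldl pvOrderStep st)
      ((PySem.Set.empty : PySem.Set Char), ([] : List Char)) = (pvOrd words, pvOrd words) := by
  have main : ∀ (ws : List String) (s : PySem.Set Char),
      ws.foldl (fun st word => word.toList.foldl pvOrderStep st) (s, s) =
        (ws.foldl (fun t w => w.toList.foldl PySem.Set.add t) s,
         ws.foldl (fun t w => w.toList.foldl PySem.Set.add t) s) := by
    intro ws
    induction ws with
    | nil => intro s; rfl
    | cons w t ih =>
      intro s
      simp only [List.foldl_cons, bOrder_pair, ih]
  exact main words PySem.Set.empty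

theorem count_go_singleton (c : Char) : ∀ (fuel : Nat) (l : List Char) (acc : Nat),
    l.length ≤ fuel → PySem.Chars.count.go [c] fuel l acc = acc + l.count c := by
  intro fuel
  induction fuel with
  | zero =>
    intro l acc h
    cases l with
    | nil => simp [PySem.Chars.count.go]
    | cons a t => simp at h
  | succ n ih =>
    intro l acc h
    cases l with
    | nil => simp [PySem.Chars.count.go]
    | cons a t =>
      rw [PySem.Chars.count.go]
      by_cases hca : c = a
      · subst hca
        have hpre : [c].isPrefixOf (c :: t) = true := by simp [List.isPrefixOf]
        simp only [hpre, if_true, List.length_singleton, List.drop_one, List.tail_cons]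
        rw [ih t (acc + 1) (by simpa using Nat.le_of_succ_le_succ (by simpa using h))]
        simp only [List.count_cons_self]
        omega
      · have hpre : [c].isPrefixOf (a :: t) = false := by simp [List.isPrefixOf, hca]
        simp only [hpre, Bool.false_eq_true, if_false]
        rw [ih t acc (by simpa using h)]
        simp [Ne.symm hca]

theorem str_count_singleton (s : String) (c : Char) :
    PySem.Str.count s (String.singleton c) = s.toList.count c := by
  unfold PySem.Str.count
  have h1 : (String.singleton c).toList = [c] := by simp
  rw [h1]
  unfold PySem.Chars.count
  simp only [List.isEmpty_cons, Bool.false_eq_true, if_false]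
  simpa using count_go_singleton c s.toList.length s.toList 0 le_rfl

theorem bCnt (c : Char) (p : List String) :
    p.foldl (fun cnt word => max cnt (PySem.Str.count word (String.singleton c))) 0 = pvCnt p c := by
  have aux : ∀ (p : List String) (n : Nat),
      p.foldl (fun cnt word => max cnt (PySem.Str.count word (String.singleton c))) n =
        p.foldl (fun cnt word => max cnt (word.toList.count c)) n := by
    intro p
    induction p with
    | nil => intro n; rfl
    | cons w t ih => intro n; simp only [List.foldl_cons, str_count_singleton]
  exact aux p 0

-- ===== VERDICT (by name: the statement is the Claim_ definition above) =====
theorem minimumCharactersForWords_spec : Claim_equal_minimumCharactersForWords := by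
  intro words _
  unfold Spec_minimumCharactersForWords minimumCharactersForWords minimumCharactersForWords_alt
  by_cases hw : words.length = 0
  · simp [hw]
  · simp only [hw, if_false]
    obtain ⟨hk, hg⟩ := amap_inv words
    have hnd : (words.foldl pvWordStep PySem.Dict.empty).keys.Nodup := by
      rw [hk]; exact pvOrd_nodup words
    -- A side: values → flatMap over pvOrd
    have hvals : (words.foldl pvWordStep PySem.Dict.empty).values =
        (pvOrd words).map (fun c => List.replicate (pvCnt words c) (String.singleton c)) := by
      rw [PySem.Dict.values_eq_map_keys _ hnd [], hk]
      refine List.map_congr_left (fun c hc => ?_)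
      have hsome : (words.foldl pvWordStep PySem.Dict.empty).get? c ≠ none := by
        rw [Ne, PySem.Dict.get?_eq_none_iff_not_mem_keys, hk]
        exact fun h => h hc
      by_cases hcnt : 0 < pvCnt words c
      · exact PySem.Dict.getD_of_get?_eq_some _ [] (by rw [hg c]; simp [hcnt])
      · exact absurd (by rw [hg c]; simp [hcnt]) hsome
    have hA : ((words.foldl pvWordStep PySem.Dict.empty).values).foldl (fun r l => r ++ l) [] =
        (pvOrd words).flatMap (fun c => List.replicate (pvCnt words c) (String.singleton c)) := by
      rw [hvals]
      have := PySem.List.foldl_append_eq_flatMap (fun l : List String => l)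
        ((pvOrd words).map (fun c => List.replicate (pvCnt words c) (String.singleton c))) []
      simpa [List.flatMap_map] using this
    -- B side
    rw [bOrder]
    have hfun : (fun (res : List String) (c : Char) =>
        res ++ List.replicate
          (words.foldl (fun cnt word => max cnt (PySem.Str.count word (String.singleton c))) 0)
          (String.singleton c)) =
        fun res c => res ++ List.replicate (pvCnt words c) (String.singleton c) := by
      funext res c; rw [bCnt]
    simp only []
    rw [hA, hfun, PySem.List.foldl_append_eq_flatMap
      (fun c => List.replicate (pvCnt words c) (String.singleton c)) (pvOrd words) []]
    simp
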